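-- pv_equiv track=rewrite | github.com/meb100/Smart-Lab-Repo | Classifier.py | color_border_pixels
-- ===== SOURCE A (Python) =====
-- def color_border_pixels(edges_image):
--     # Color border pixels only
--     # L to R
--     border_image = [[False for n in range(len(edges_image[0]))] for m in range(len(edges_image))]
--     # [[False] * 4] * 4 - The multiplication produces a shallow copy of the list! So this is a list of references to the one same inner list.
--     for r in range(len(edges_image)):
--         for c in range(len(edges_image[0])):
--             if edges_image[r][c] == True:
--                 border_image[r][c] = True
--                 break
--     # R to L
--     for r in range(len(edges_image)):
--         for c in range(len(edges_image[0]) - 1, -1, -1):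
--             if edges_image[r][c] == True:
--                 border_image[r][c] = True
--                 break
--     # Top to bottom
--     for c in range(len(edges_image[0])):
--         for r in range(len(edges_image)):
--             if edges_image[r][c] == True:
--                 border_image[r][c] = True
--                 break
--     # Bottom to top
--     for c in range(len(edges_image[0])):
--         for r in range(len(edges_image) - 1, -1, -1):
--             if edges_image[r][c] == True:
--                 border_image[r][c] = True
--                 break
--     return border_image
-- ===== SOURCE B (Python) =====
-- def color_border_pixels(edges_image):
--     # One pass over all cells maintaining running first/last tables per row and
--     # column; then the border grid is built by marking each table entry.
--     h = len(edges_image)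
--     w = len(edges_image[0])
--     row_first = {}
--     row_last = {}
--     col_first = {}
--     col_last = {}
--     for r in range(h):
--         for c in range(w):
--             if edges_image[r][c] == True:
--                 if r not in row_first:
--                     row_first[r] = c
--                 row_last[r] = c
--                 if c not in col_first:
--                     col_first[c] = r
--                 col_last[c] = r
--     border = [[False] * w for _ in range(h)]
--     for r, c in row_first.items():
--         border[r][c] = True
--     for r, c in row_last.items():
--         border[r][c] = True
--     for c, r in col_first.items():
--         border[r][c] = True
--     for c, r in col_last.items():
--         border[r][c] = True
--     return border
-- ===== Notes on version B (the rewrite author's own statement) =====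
-- stated objective: alternative
-- what changed: A runs four separate directional marking passes (L-to-R, R-to-L, top-down, bottom-up) each with an inner search-and-break; B makes ONE pass over all cells maintaining four running min/max tables (dicts) for rows and columns and then marks the tabled entries, so the reversed scans and the break-searches disappear.
import Mathlib
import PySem

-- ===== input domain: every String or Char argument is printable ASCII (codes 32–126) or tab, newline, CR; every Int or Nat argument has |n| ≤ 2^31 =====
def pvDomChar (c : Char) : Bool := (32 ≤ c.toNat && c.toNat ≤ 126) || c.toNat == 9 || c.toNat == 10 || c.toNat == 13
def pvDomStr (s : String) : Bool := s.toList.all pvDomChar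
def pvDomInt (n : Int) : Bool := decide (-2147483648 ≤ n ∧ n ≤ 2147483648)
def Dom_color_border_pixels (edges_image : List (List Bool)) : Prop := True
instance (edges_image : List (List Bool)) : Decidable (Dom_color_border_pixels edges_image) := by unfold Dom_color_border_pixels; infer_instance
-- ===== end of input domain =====

-- B replaces A's four directional marking passes (each with a search-and-break) by ONE pass
-- over all cells maintaining running first/last tables (dicts) for rows and columns, then
-- marks the tabled entries (alternative decomposition, same cost).

-- ===== PORT A =====
-- border_image[r][c] = True  (shared helper: the Python statement 'border[r][c] = True')
def setCell (b : List (List Bool)) (r c : Nat) : List (List Bool) :=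
  b.set r ((b.getD r []).set c true)

-- 'for c in cs: if edges_image[r][c] == True: border[r][c] = True; break'
def markRow (edges : List (List Bool)) (b : List (List Bool)) (r : Nat) : List Nat → List (List Bool)
  | [] => b
  | c :: rest =>
    if ((edges.getD r []).getD c false) == true then setCell b r c
    else markRow edges b r rest

-- 'for r in rs: if edges_image[r][c] == True: border[r][c] = True; break'
def markCol (edges : List (List Bool)) (b : List (List Bool)) (c : Nat) : List Nat → List (List Bool)
  | [] => b
  | r :: rest =>
    if ((edges.getD r []).getD c false) == true then setCell b r c
    else markCol edges b c rest

def color_border_pixels (edges_image : List (List Bool)) : List (List Bool) :=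
  let h := edges_image.length
  let w := (edges_image.getD 0 []).length
  -- [[False for n in range(w)] for m in range(h)]
  let border0 := (List.range h).map (fun _ => (List.range w).map (fun _ => false))
  -- L to R   (range(w-1,-1,-1) is transliterated as (List.range w).reverse)
  let b1 := (List.range h).foldl (fun b r => markRow edges_image b r (List.range w)) border0
  -- R to L
  let b2 := (List.range h).foldl (fun b r => markRow edges_image b r ((List.range w).reverse)) b1
  -- Top to bottom
  let b3 := (List.range w).foldl (fun b c => markCol edges_image b c (List.range h)) b2
  -- Bottom to top
  (List.range w).foldl (fun b c => markCol edges_image b c ((List.range h).reverse)) b3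

-- ===== PORT B =====
-- Single pass: state is the four dicts (row_first, row_last, col_first, col_last)
def color_border_pixels_alt (edges_image : List (List Bool)) : List (List Bool) :=
  let h := edges_image.length
  let w := (edges_image.getD 0 []).length
  let st := (List.range h).foldl (fun st r => (List.range w).foldl (fun st c =>
      if ((edges_image.getD r []).getD c false) == true then
        ((if st.1.contains r then st.1 else st.1.insert r c),     -- if r not in row_first: row_first[r] = c
         st.2.1.insert r c,                                       -- row_last[r] = c
         (if st.2.2.1.contains c then st.2.2.1 else st.2.2.1.insert c r),  -- if c not in col_first: col_first[c] = r
         st.2.2.2.insert c r)                                     -- col_last[c] = r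
      else st) st)
    ((PySem.Dict.empty : PySem.Dict Nat Nat), (PySem.Dict.empty : PySem.Dict Nat Nat),
     (PySem.Dict.empty : PySem.Dict Nat Nat), (PySem.Dict.empty : PySem.Dict Nat Nat))
  -- border = [[False] * w for _ in range(h)]
  let border0 := (List.range h).map (fun _ => (List.range w).map (fun _ => false))
  let b1 := st.1.items.foldl (fun b p => setCell b p.1 p.2) border0      -- for r, c in row_first.items()
  let b2 := st.2.1.items.foldl (fun b p => setCell b p.1 p.2) b1        -- for r, c in row_last.items()
  let b3 := st.2.2.1.items.foldl (fun b p => setCell b p.2 p.1) b2      -- for c, r in col_first.items()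
  st.2.2.2.items.foldl (fun b p => setCell b p.2 p.1) b3                -- for c, r in col_last.items()

-- ===== PRECONDITION & SPEC =====
-- Pre_ excludes exactly the inputs where Python A raises IndexError: the empty image
-- (edges_image[0]) and ragged images having a row shorter than the first row.
def Pre_color_border_pixels (edges_image : List (List Bool)) : Prop :=
  edges_image ≠ [] ∧ ∀ row ∈ edges_image, (edges_image.getD 0 []).length ≤ row.length
instance (edges_image : List (List Bool)) : Decidable (Pre_color_border_pixels edges_image) := by
  unfold Pre_color_border_pixels; infer_instance

def pvWitness_color_border_pixels : List (List Bool) :=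
  [[true, false, false], [false, false, true], [false, false, false]]

def Spec_color_border_pixels (edges_image : List (List Bool)) (out : List (List Bool)) : Prop := out = color_border_pixels_alt edges_image
instance (edges_image : List (List Bool)) (out : List (List Bool)) : Decidable (Spec_color_border_pixels edges_image out) := by unfold Spec_color_border_pixels; infer_instance

-- ===== CLAIM (what is proved, stated in full; the proofs are below) =====
def Claim_equal_color_border_pixels : Prop := ∀ (edges_image : List (List Bool)), Dom_color_border_pixels edges_image → Pre_color_border_pixels edges_image → Spec_color_border_pixels edges_image (color_border_pixels edges_image)

-- ===== LEMMAS AND PROOFS =====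

def cellE (edges : List (List Bool)) (r c : Nat) : Bool :=
  ((edges.getD r []).getD c false) == true

-- first index in the list satisfying p (else none)
def scanP (p : Nat → Bool) : List Nat → Option Nat
  | [] => none
  | i :: rest => if p i then some i else scanP p rest

theorem scanP_eq_some {p : Nat → Bool} : ∀ {l : List Nat} {i : Nat},
    scanP p l = some i → i ∈ l ∧ p i = true := by
  intro l
  induction l with
  | nil => intro i h; simp [scanP] at h
  | cons a rest ih =>
    intro i h
    by_cases hpa : p a = true
    · simp [scanP, hpa] at h; subst h; exact ⟨by simp, hpa⟩
    · rw [scanP, if_neg hpa] at h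
      obtain ⟨h1, h2⟩ := ih h
      exact ⟨by simp [h1], h2⟩

theorem scanP_append_singleton {p : Nat → Bool} : ∀ (l : List Nat) (a : Nat),
    scanP p (l ++ [a]) = match scanP p l with
      | some i => some i
      | none => if p a then some a else none := by
  intro l a
  induction l with
  | nil => simp [scanP]
  | cons b rest ih =>
    by_cases hpb : p b = true
    · simp [scanP, hpb]
    · simp only [List.cons_append, scanP, if_neg hpb, ih]

def gridOf (h w : Nat) (P : Nat → Nat → Bool) : List (List Bool) :=
  (List.range h).map (fun r => (List.range w).map (fun c => P r c))

theorem gridOf_congr {h w : Nat} {P Q : Nat → Nat → Bool}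
    (hpq : ∀ r < h, ∀ c < w, P r c = Q r c) : gridOf h w P = gridOf h w Q := by
  unfold gridOf
  apply List.map_congr_left
  intro r hr
  apply List.map_congr_left
  intro c hc
  exact hpq r (List.mem_range.mp hr) c (List.mem_range.mp hc)

theorem mapRange_getD {α : Type} {n i : Nat} (f : Nat → α) (d : α) (hi : i < n) :
    (((List.range n).map f).getD i d) = f i := by
  rw [List.getD_eq_getElem _ _ (by simpa using hi)]
  simp

theorem setCell_gridOf {h w : Nat} {P : Nat → Nat → Bool} {r c : Nat}
    (hr : r < h) (hc : c < w) :
    setCell (gridOf h w P) r c = gridOf h w (fun r' c' => P r' c' || (r' == r && c' == c)) := by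
  unfold setCell gridOf
  rw [mapRange_getD _ _ hr]
  apply List.ext_getElem
  · simp
  · intro i hi hi'
    simp only [List.length_set, List.length_map, List.length_range] at hi
    simp only [List.getElem_set, List.getElem_map, List.getElem_range]
    by_cases hir : i = r
    · subst hir
      simp only []
      apply List.ext_getElem
      · simp
      · intro j hj hj'
        have hj2 : j < w := by simpa using hj
        simp only [List.getElem_map, List.getElem_range]
        by_cases hjc : j = c
        · subst hjc; simp
        · have hbe : (j == c) = false := by simp [hjc]
          simp [Ne.symm hjc, hbe]
    · have hbe : (i == r) = false := by simp [hir]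
      simp [Ne.symm hir, hbe]

-- the common characterisation both programs compute: first/last True of row r, of column c
def canonP (edges : List (List Bool)) (h w : Nat) (r c : Nat) : Bool :=
  (scanP (cellE edges r) (List.range w) == some c) ||
  (scanP (cellE edges r) ((List.range w).reverse) == some c) ||
  (scanP (fun r' => cellE edges r' c) (List.range h) == some r) ||
  (scanP (fun r' => cellE edges r' c) ((List.range h).reverse) == some r)

-- ========== A side ==========

theorem markRow_gridOf {edges : List (List Bool)} {h w : Nat} {r : Nat}
    (hr : r < h) :
    ∀ (cs : List Nat) (P : Nat → Nat → Bool), (∀ i ∈ cs, i < w) →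
    markRow edges (gridOf h w P) r cs
      = gridOf h w (fun r' c' => P r' c' || ((r' == r) && (scanP (cellE edges r) cs == some c'))) := by
  intro cs
  induction cs with
  | nil =>
    intro P _
    simp only [markRow]
    apply gridOf_congr
    intro r' _ c' _
    simp [scanP]
  | cons c0 rest ih =>
    intro P hcs
    by_cases hcell : ((edges.getD r []).getD c0 false) = true <;>
      simp only [List.getD_eq_getElem?_getD] at hcell
    · rw [markRow, if_pos (by simp [hcell])]
      rw [setCell_gridOf hr (hcs c0 (by simp))]
      apply gridOf_congr
      intro r' _ c' _
      by_cases h2 : c' = c0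
      · subst h2; simp [scanP, cellE, hcell]
      · have e1 : (c' == c0) = false := by simp [h2]
        have e2 : (c0 == c') = false := by simp [Ne.symm h2]
        simp [scanP, cellE, hcell, e1, e2]
    · rw [markRow, if_neg (by simp [hcell])]
      rw [ih P (fun i hi => hcs i (List.mem_cons_of_mem _ hi))]
      apply gridOf_congr
      intro r' _ c' _
      simp [scanP, cellE, hcell]

theorem markCol_gridOf {edges : List (List Bool)} {h w : Nat} {c : Nat}
    (hc : c < w) :
    ∀ (rs : List Nat) (P : Nat → Nat → Bool), (∀ i ∈ rs, i < h) →
    markCol edges (gridOf h w P) c rs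
      = gridOf h w (fun r' c' => P r' c' || ((c' == c) && (scanP (fun r => cellE edges r c) rs == some r'))) := by
  intro rs
  induction rs with
  | nil =>
    intro P _
    simp only [markCol]
    apply gridOf_congr
    intro r' _ c' _
    simp [scanP]
  | cons r0 rest ih =>
    intro P hrs
    by_cases hcell : ((edges.getD r0 []).getD c false) = true <;>
      simp only [List.getD_eq_getElem?_getD] at hcell
    · rw [markCol, if_pos (by simp [hcell])]
      rw [setCell_gridOf (hrs r0 (by simp)) hc]
      apply gridOf_congr
      intro r' _ c' _
      by_cases h2 : r' = r0
      · subst h2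
        by_cases h3 : c' = c
        · subst h3; simp [scanP, cellE, hcell]
        · have e1 : (c' == c) = false := by simp [h3]
          simp [scanP, cellE, hcell, e1]
      · have e1 : (r' == r0) = false := by simp [h2]
        have e2 : (r0 == r') = false := by simp [Ne.symm h2]
        simp [scanP, cellE, hcell, e1, e2]
    · rw [markCol, if_neg (by simp [hcell])]
      rw [ih P (fun i hi => hrs i (List.mem_cons_of_mem _ hi))]
      apply gridOf_congr
      intro r' _ c' _
      simp [scanP, cellE, hcell]

theorem rowsPass {edges : List (List Bool)} {h w : Nat} {cs : List Nat}
    (hcs : ∀ i ∈ cs, i < w) :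
    ∀ (rs : List Nat) (P : Nat → Nat → Bool), (∀ r ∈ rs, r < h) →
    rs.foldl (fun b r => markRow edges b r cs) (gridOf h w P)
      = gridOf h w (fun r' c' => P r' c' || (decide (r' ∈ rs) && (scanP (cellE edges r') cs == some c'))) := by
  intro rs
  induction rs with
  | nil =>
    intro P _
    simp only [List.foldl_nil]
    apply gridOf_congr
    intro r' _ c' _
    simp
  | cons r0 rest ih =>
    intro P hrs
    simp only [List.foldl_cons]
    rw [markRow_gridOf (hrs r0 (by simp)) cs P hcs]
    rw [ih _ (fun r hr => hrs r (List.mem_cons_of_mem _ hr))]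
    apply gridOf_congr
    intro r' _ c' _
    by_cases h0 : r' = r0
    · subst h0; simp; tauto
    · have e : (r' == r0) = false := by simp [h0]
      simp [e, h0]

theorem colsPass {edges : List (List Bool)} {h w : Nat} {rsIdx : List Nat}
    (hrs : ∀ i ∈ rsIdx, i < h) :
    ∀ (cs : List Nat) (P : Nat → Nat → Bool), (∀ c ∈ cs, c < w) →
    cs.foldl (fun b c => markCol edges b c rsIdx) (gridOf h w P)
      = gridOf h w (fun r' c' => P r' c' || (decide (c' ∈ cs) && (scanP (fun r => cellE edges r c') rsIdx == some r'))) := by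
  intro cs
  induction cs with
  | nil =>
    intro P _
    simp only [List.foldl_nil]
    apply gridOf_congr
    intro r' _ c' _
    simp
  | cons c0 rest ih =>
    intro P hcs
    simp only [List.foldl_cons]
    rw [markCol_gridOf (hcs c0 (by simp)) rsIdx P hrs]
    rw [ih _ (fun c hc => hcs c (List.mem_cons_of_mem _ hc))]
    apply gridOf_congr
    intro r' _ c' _
    by_cases h0 : c' = c0
    · subst h0; simp; tauto
    · have e : (c' == c0) = false := by simp [h0]
      simp [e, h0]

theorem A_eq_canon (edges : List (List Bool)) :
    color_border_pixels edges
      = gridOf edges.length (edges.getD 0 []).length (canonP edges edges.length (edges.getD 0 []).length) := by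
  unfold color_border_pixels
  simp only []
  set h := edges.length with hh
  set w := (edges.getD 0 []).length with hw
  have hb0 : (List.range h).map (fun _ => (List.range w).map (fun _ => false))
      = gridOf h w (fun _ _ => false) := rfl
  rw [hb0]
  rw [rowsPass (by simp) _ _ (by simp),
      rowsPass (by simp) _ _ (by simp),
      colsPass (by simp) _ _ (by simp),
      colsPass (by simp) _ _ (by simp)]
  apply gridOf_congr
  intro r hr c hc
  simp [canonP, hr, hc, Bool.or_assoc]

-- ========== B side ==========
-- the four per-component single-cell updates and row folds

def rfStep (edges : List (List Bool)) (r : Nat) (d : PySem.Dict Nat Nat) (c : Nat) : PySem.Dict Nat Nat :=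
  if cellE edges r c then (if d.contains r then d else d.insert r c) else d
def rlStep (edges : List (List Bool)) (r : Nat) (d : PySem.Dict Nat Nat) (c : Nat) : PySem.Dict Nat Nat :=
  if cellE edges r c then d.insert r c else d
def cfStep (edges : List (List Bool)) (r : Nat) (d : PySem.Dict Nat Nat) (c : Nat) : PySem.Dict Nat Nat :=
  if cellE edges r c then (if d.contains c then d else d.insert c r) else d
def clStep (edges : List (List Bool)) (r : Nat) (d : PySem.Dict Nat Nat) (c : Nat) : PySem.Dict Nat Nat :=
  if cellE edges r c then d.insert c r else d

-- a fold whose step acts componentwise on a 4-tuple splits into four folds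
theorem foldl_prod4_split {alpha beta : Type} (f g h k : alpha → beta → alpha) :
    ∀ (l : List beta) (st : alpha × alpha × alpha × alpha),
    l.foldl (fun st x => (f st.1 x, g st.2.1 x, h st.2.2.1 x, k st.2.2.2 x)) st
      = (l.foldl f st.1, l.foldl g st.2.1, l.foldl h st.2.2.1, l.foldl k st.2.2.2) := by
  intro l
  induction l with
  | nil => intro st; rfl
  | cons x rest ih => intro st; exact ih _

-- the nested pass splits into four independent component folds
theorem pass_split (edges : List (List Bool)) (w : Nat) :
    ∀ (rs : List Nat)
      (st : PySem.Dict Nat Nat × PySem.Dict Nat Nat × PySem.Dict Nat Nat × PySem.Dict Nat Nat),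
    rs.foldl (fun st r => (List.range w).foldl (fun st c =>
      if ((edges.getD r []).getD c false) == true then
        ((if st.1.contains r then st.1 else st.1.insert r c),
         st.2.1.insert r c,
         (if st.2.2.1.contains c then st.2.2.1 else st.2.2.1.insert c r),
         st.2.2.2.insert c r)
      else st) st) st
    = (rs.foldl (fun d r => (List.range w).foldl (rfStep edges r) d) st.1,
       rs.foldl (fun d r => (List.range w).foldl (rlStep edges r) d) st.2.1,
       rs.foldl (fun d r => (List.range w).foldl (cfStep edges r) d) st.2.2.1,
       rs.foldl (fun d r => (List.range w).foldl (clStep edges r) d) st.2.2.2) := by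
  have inner : ∀ (r : Nat) (cs : List Nat)
      (st : PySem.Dict Nat Nat × PySem.Dict Nat Nat × PySem.Dict Nat Nat × PySem.Dict Nat Nat),
      cs.foldl (fun st c =>
        if ((edges.getD r []).getD c false) == true then
          ((if st.1.contains r then st.1 else st.1.insert r c),
           st.2.1.insert r c,
           (if st.2.2.1.contains c then st.2.2.1 else st.2.2.1.insert c r),
           st.2.2.2.insert c r)
        else st) st
      = (cs.foldl (rfStep edges r) st.1, cs.foldl (rlStep edges r) st.2.1,
         cs.foldl (cfStep edges r) st.2.2.1, cs.foldl (clStep edges r) st.2.2.2) := by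
    intro r cs
    induction cs with
    | nil => intro st; rfl
    | cons c rest ih =>
      intro st
      simp only [List.foldl_cons, ih]
      by_cases hc : ((edges.getD r []).getD c false) = true
      · have hb : (((edges.getD r []).getD c false) == true) = true := by rw [hc]; rfl
        rw [if_pos hb]
        simp only [rfStep, rlStep, cfStep, clStep, cellE, hc]
        rfl
      · have hf : ((edges.getD r []).getD c false) = false := Bool.not_eq_true _ |>.mp hc
        have hb : (((edges.getD r []).getD c false) == true) = false := by rw [hf]; rfl
        rw [if_neg (by rw [hb]; exact Bool.false_ne_true)]
        simp only [rfStep, rlStep, cfStep, clStep, cellE, hf]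
        rfl
  intro rs st
  simp only [inner]
  exact foldl_prod4_split (fun d r => (List.range w).foldl (rfStep edges r) d)
    (fun d r => (List.range w).foldl (rlStep edges r) d)
    (fun d r => (List.range w).foldl (cfStep edges r) d)
    (fun d r => (List.range w).foldl (clStep edges r) d) rs st

-- per-row characterisation of each component fold

theorem rfRow_char (edges : List (List Bool)) (r : Nat) :
    ∀ (cs : List Nat) (d : PySem.Dict Nat Nat),
    cs.foldl (rfStep edges r) d
      = match d.get? r with
        | some _ => d
        | none => match scanP (cellE edges r) cs with
                  | none => d
                  | some c => d.insert r c := by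
  intro cs
  induction cs with
  | nil =>
    intro d
    simp only [List.foldl_nil, scanP]
    cases d.get? r <;> rfl
  | cons c rest ih =>
    intro d
    simp only [List.foldl_cons]
    by_cases hc : cellE edges r c = true
    · rw [rfStep, if_pos hc]
      by_cases hd : d.contains r = true
      · rw [if_pos hd, ih]
        obtain ⟨v, hv⟩ : ∃ v, d.get? r = some v := by
          have := PySem.Dict.contains_eq_isSome_get? (d := d) (k := r)
          rw [hd] at this
          exact Option.isSome_iff_exists.mp this.symm
        simp [hv]
      · rw [if_neg hd, ih]
        have hdn : d.get? r = none :=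
          (PySem.Dict.get?_eq_none_iff_contains d r).mpr (Eq.mp (Bool.not_eq_true _) hd)
        rw [PySem.Dict.get?_insert_self]
        simp [scanP, hc, hdn]
    · rw [rfStep, if_neg hc, ih]
      simp [scanP, hc]

theorem rlRow_char (edges : List (List Bool)) (r : Nat) :
    ∀ (cs : List Nat) (d : PySem.Dict Nat Nat),
    cs.foldl (rlStep edges r) d
      = match scanP (cellE edges r) cs.reverse with
        | none => d
        | some c => d.insert r c := by
  intro cs
  induction cs with
  | nil => intro d; simp [scanP]
  | cons c rest ih =>
    intro d
    simp only [List.foldl_cons, List.reverse_cons, scanP_append_singleton]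
    by_cases hc : cellE edges r c = true
    · rw [rlStep, if_pos hc, ih]
      cases hs : scanP (cellE edges r) rest.reverse with
      | none => simp [hc]
      | some c' => simp [PySem.Dict.insert_insert_self]
    · rw [rlStep, if_neg hc, ih]
      cases hs : scanP (cellE edges r) rest.reverse with
      | none => simp [hc]
      | some c' => simp

theorem cfRow_char (edges : List (List Bool)) (r : Nat) :
    ∀ (cs : List Nat) (d : PySem.Dict Nat Nat) (x : Nat),
    (cs.foldl (cfStep edges r) d).get? x
      = if x ∈ cs ∧ cellE edges r x = true ∧ d.get? x = none then some r else d.get? x := by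
  intro cs
  induction cs with
  | nil => intro d x; simp
  | cons c rest ih =>
    intro d x
    simp only [List.foldl_cons]
    by_cases hc : cellE edges r c = true
    · rw [cfStep, if_pos hc]
      by_cases hd : d.contains c = true
      · obtain ⟨v, hv⟩ : ∃ v, d.get? c = some v := by
          have := PySem.Dict.contains_eq_isSome_get? (d := d) (k := c)
          rw [hd] at this
          exact Option.isSome_iff_exists.mp this.symm
        rw [if_pos hd, ih]
        by_cases hx : x = c
        · subst hx; simp [hv]
        · have : (x ∈ c :: rest ∧ cellE edges r x = true ∧ d.get? x = none)
              ↔ (x ∈ rest ∧ cellE edges r x = true ∧ d.get? x = none) := by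
            simp [hx]
          simp only [this]
      · rw [if_neg hd, ih]
        by_cases hx : x = c
        · subst hx
          have hdn : d.get? x = none :=
            (PySem.Dict.get?_eq_none_iff_contains d x).mpr (Eq.mp (Bool.not_eq_true _) hd)
          rw [PySem.Dict.get?_insert_self]
          simp [hc, hdn]
        · rw [PySem.Dict.get?_insert_of_ne _ _ hx]
          have : (x ∈ c :: rest ∧ cellE edges r x = true ∧ d.get? x = none)
              ↔ (x ∈ rest ∧ cellE edges r x = true ∧ d.get? x = none) := by
            simp [hx]
          simp only [this]
    · rw [cfStep, if_neg hc, ih]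
      by_cases hx : x = c
      · subst hx; simp [hc]
      · have : (x ∈ c :: rest ∧ cellE edges r x = true ∧ d.get? x = none)
            ↔ (x ∈ rest ∧ cellE edges r x = true ∧ d.get? x = none) := by
          simp [hx]
        simp only [this]

theorem clRow_char (edges : List (List Bool)) (r : Nat) :
    ∀ (cs : List Nat) (d : PySem.Dict Nat Nat) (x : Nat),
    (cs.foldl (clStep edges r) d).get? x
      = if x ∈ cs ∧ cellE edges r x = true then some r else d.get? x := by
  intro cs
  induction cs with
  | nil => intro d x; simp
  | cons c rest ih =>
    intro d x
    simp only [List.foldl_cons]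
    by_cases hc : cellE edges r c = true
    · rw [clStep, if_pos hc, ih]
      by_cases hx : x = c
      · subst hx
        by_cases hm : x ∈ rest ∧ cellE edges r x = true
        · simp [hm]
        · rw [if_neg hm, PySem.Dict.get?_insert_self]
          simp [hc]
      · rw [PySem.Dict.get?_insert_of_ne _ _ hx]
        have : (x ∈ c :: rest ∧ cellE edges r x = true) ↔ (x ∈ rest ∧ cellE edges r x = true) := by
          simp [hx]
        simp only [this]
    · rw [clStep, if_neg hc, ih]
      by_cases hx : x = c
      · subst hx; simp [hc]
      · have : (x ∈ c :: rest ∧ cellE edges r x = true) ↔ (x ∈ rest ∧ cellE edges r x = true) := by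
          simp [hx]
        simp only [this]

-- whole-pass characterisations (over the list of rows)

theorem rfPass_char (edges : List (List Bool)) (w : Nat) :
    ∀ (rs : List Nat), rs.Nodup → ∀ (d : PySem.Dict Nat Nat), (∀ y ∈ rs, d.get? y = none) →
    ∀ x, (rs.foldl (fun d r => (List.range w).foldl (rfStep edges r) d) d).get? x
      = if x ∈ rs then scanP (cellE edges x) (List.range w) else d.get? x := by
  intro rs
  induction rs with
  | nil => intro _ d _ x; simp
  | cons r0 rest ih =>
    intro hnd d hfresh x
    have hnd' := (List.nodup_cons.mp hnd)
    simp only [List.foldl_cons]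
    rw [rfRow_char, hfresh r0 (by simp)]
    have step_get : ∀ y, ((match scanP (cellE edges r0) (List.range w) with
        | none => d
        | some c => d.insert r0 c) : PySem.Dict Nat Nat).get? y
        = if y = r0 then scanP (cellE edges r0) (List.range w) else d.get? y := by
      intro y
      cases hs : scanP (cellE edges r0) (List.range w) with
      | none =>
        simp only []
        by_cases hy : y = r0
        · subst hy; simp [hfresh y (by simp)]
        · simp [hy]
      | some c =>
        simp only []
        by_cases hy : y = r0
        · subst hy; simp [PySem.Dict.get?_insert_self]
        · simp [PySem.Dict.get?_insert_of_ne _ _ hy, hy]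
    rw [ih hnd'.2 _ (by
      intro y hy
      rw [step_get y, if_neg (by rintro rfl; exact hnd'.1 hy)]
      exact hfresh y (by simp [hy]))]
    by_cases hx : x ∈ rest
    · simp [hx]
    · rw [if_neg hx, step_get x]
      by_cases hx0 : x = r0
      · subst hx0; simp
      · simp [hx0, hx]

theorem rlPass_char (edges : List (List Bool)) (w : Nat) :
    ∀ (rs : List Nat), rs.Nodup → ∀ (d : PySem.Dict Nat Nat), (∀ y ∈ rs, d.get? y = none) →
    ∀ x, (rs.foldl (fun d r => (List.range w).foldl (rlStep edges r) d) d).get? x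
      = if x ∈ rs then scanP (cellE edges x) ((List.range w).reverse) else d.get? x := by
  intro rs
  induction rs with
  | nil => intro _ d _ x; simp
  | cons r0 rest ih =>
    intro hnd d hfresh x
    have hnd' := (List.nodup_cons.mp hnd)
    simp only [List.foldl_cons]
    rw [rlRow_char]
    have step_get : ∀ y, ((match scanP (cellE edges r0) ((List.range w).reverse) with
        | none => d
        | some c => d.insert r0 c) : PySem.Dict Nat Nat).get? y
        = if y = r0 then scanP (cellE edges r0) ((List.range w).reverse) else d.get? y := by
      intro y
      cases hs : scanP (cellE edges r0) ((List.range w).reverse) with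
      | none =>
        simp only []
        by_cases hy : y = r0
        · subst hy; simp [hfresh y (by simp)]
        · simp [hy]
      | some c =>
        simp only []
        by_cases hy : y = r0
        · subst hy; simp [PySem.Dict.get?_insert_self]
        · simp [PySem.Dict.get?_insert_of_ne _ _ hy, hy]
    rw [ih hnd'.2 _ (by
      intro y hy
      rw [step_get y, if_neg (by rintro rfl; exact hnd'.1 hy)]
      exact hfresh y (by simp [hy]))]
    by_cases hx : x ∈ rest
    · simp [hx]
    · rw [if_neg hx, step_get x]
      by_cases hx0 : x = r0
      · subst hx0; simp
      · simp [hx0, hx]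

theorem cfPass_char (edges : List (List Bool)) (w : Nat) :
    ∀ (rs : List Nat) (d : PySem.Dict Nat Nat) (x : Nat),
    (rs.foldl (fun d r => (List.range w).foldl (cfStep edges r) d) d).get? x
      = match d.get? x with
        | some v => some v
        | none => scanP (fun r => decide (x ∈ List.range w) && cellE edges r x) rs := by
  intro rs
  induction rs with
  | nil =>
    intro d x
    simp only [List.foldl_nil, scanP]
    cases d.get? x <;> rfl
  | cons r0 rest ih =>
    intro d x
    simp only [List.foldl_cons]
    rw [ih, cfRow_char]
    cases hdx : d.get? x with
    | some v => simp
    | none =>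
      by_cases hp : x ∈ List.range w ∧ cellE edges r0 x = true
      · rw [if_pos ⟨hp.1, hp.2, rfl⟩]
        simp [scanP, hp.1, hp.2]
      · rw [if_neg (by rintro ⟨h1, h2, _⟩; exact hp ⟨h1, h2⟩)]
        have hcf : (decide (x ∈ List.range w) && cellE edges r0 x) = false := by
          by_cases h1 : x ∈ List.range w
          · by_cases h2 : cellE edges r0 x = true
            · exact absurd ⟨h1, h2⟩ hp
            · simp [Bool.eq_false_iff.mpr h2]
          · simp [h1]
        rw [show scanP (fun r => decide (x ∈ List.range w) && cellE edges r x) (r0 :: rest)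
              = if (decide (x ∈ List.range w) && cellE edges r0 x) = true then some r0
                else scanP (fun r => decide (x ∈ List.range w) && cellE edges r x) rest from rfl,
            hcf]
        simp

theorem clPass_char (edges : List (List Bool)) (w : Nat) :
    ∀ (rs : List Nat) (d : PySem.Dict Nat Nat) (x : Nat),
    (rs.foldl (fun d r => (List.range w).foldl (clStep edges r) d) d).get? x
      = match scanP (fun r => decide (x ∈ List.range w) && cellE edges r x) rs.reverse with
        | some v => some v
        | none => d.get? x := by
  intro rs
  induction rs with
  | nil => intro d x; simp [scanP]
  | cons r0 rest ih =>
    intro d x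
    simp only [List.foldl_cons, List.reverse_cons, scanP_append_singleton]
    rw [ih, clRow_char]
    cases hs : scanP (fun r => decide (x ∈ List.range w) && cellE edges r x) rest.reverse with
    | some v => simp
    | none =>
      simp only []
      by_cases hp : x ∈ List.range w ∧ cellE edges r0 x = true
      · have hcond : (decide (x ∈ List.range w) && cellE edges r0 x) = true := by
          simp [hp.1, hp.2]
        rw [if_pos hp, if_pos hcond]
      · have hcond : ¬((decide (x ∈ List.range w) && cellE edges r0 x) = true) := by
          simp only [Bool.and_eq_true, decide_eq_true_eq]
          exact fun hq => hp ⟨hq.1, hq.2⟩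
        rw [if_neg hp, if_neg hcond]

-- folds of nodup-key-preserving steps preserve nodup keys
theorem nodup_foldl_preserve {sigma : Type} (f : PySem.Dict Nat Nat → sigma → PySem.Dict Nat Nat)
    (hf : ∀ d x, d.keys.Nodup → (f d x).keys.Nodup) :
    ∀ (l : List sigma) (d : PySem.Dict Nat Nat), d.keys.Nodup → (l.foldl f d).keys.Nodup := by
  intro l
  induction l with
  | nil => intro d hd; simpa using hd
  | cons x rest ih => intro d hd; exact ih _ (hf d x hd)

theorem step_nodup (edges : List (List Bool)) (r : Nat)
    (step : PySem.Dict Nat Nat → Nat → PySem.Dict Nat Nat)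
    (hstep : step = rfStep edges r ∨ step = rlStep edges r ∨ step = cfStep edges r ∨ step = clStep edges r) :
    ∀ (d : PySem.Dict Nat Nat) (c : Nat), d.keys.Nodup → (step d c).keys.Nodup := by
  intro d c hd
  rcases hstep with h | h | h | h <;> subst h <;>
    simp only [rfStep, rlStep, cfStep, clStep] <;>
    split_ifs <;> first
      | exact hd
      | exact PySem.Dict.nodup_keys_insert _ _ _ hd

-- marking a list of in-range pairs onto a grid
theorem markPairs_gridOf {h w : Nat} (f g : Nat × Nat → Nat) :
    ∀ (ps : List (Nat × Nat)) (P : Nat → Nat → Bool),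
    (∀ p ∈ ps, f p < h ∧ g p < w) →
    ps.foldl (fun b p => setCell b (f p) (g p)) (gridOf h w P)
      = gridOf h w (fun r c => P r c || ps.any (fun p => f p == r && g p == c)) := by
  intro ps
  induction ps with
  | nil =>
    intro P _
    simp only [List.foldl_nil]
    apply gridOf_congr
    intro r _ c _
    simp
  | cons p rest ih =>
    intro P hps
    simp only [List.foldl_cons]
    rw [setCell_gridOf (hps p (by simp)).1 (hps p (by simp)).2]
    rw [ih _ (fun q hq => hps q (List.mem_cons_of_mem _ hq))]
    apply gridOf_congr
    intro r _ c _
    simp only [List.any_cons, Bool.or_assoc]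
    congr 1
    congr 1
    by_cases h1 : r = f p
    · by_cases h2 : c = g p
      · subst h1; subst h2; simp
      · have : (g p == c) = false := by simp [Ne.symm h2]
        have e2 : (c == g p) = false := by simp [h2]
        simp [this, e2]
    · have : (f p == r) = false := by simp [Ne.symm h1]
      have e2 : (r == f p) = false := by simp [h1]
      simp [this, e2]

-- any-over-items is a lookup, for a dict with nodup keys
theorem items_any_eq (d : PySem.Dict Nat Nat) (hnd : d.keys.Nodup) (r c : Nat) :
    d.items.any (fun p => p.1 == r && p.2 == c) = (d.get? r == some c) := by
  by_cases hg : d.get? r = some c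
  · have hm := PySem.Dict.mem_items_of_get?_eq_some _ hg
    rw [hg]
    simp only [beq_self_eq_true]
    exact List.any_eq_true.mpr ⟨(r, c), hm, by simp⟩
  · have : d.items.any (fun p => p.1 == r && p.2 == c) = false := by
      rw [List.any_eq_false]
      rintro ⟨a, b⟩ hmem hab
      simp only [Bool.and_eq_true, beq_iff_eq] at hab
      obtain ⟨rfl, rfl⟩ := hab
      exact hg (PySem.Dict.get?_of_mem_items _ hmem hnd)
    rw [this, eq_comm, Bool.eq_false_iff, ne_eq, beq_iff_eq]
    exact fun he => hg he

theorem B_eq_canon (edges : List (List Bool)) :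
    color_border_pixels_alt edges
      = gridOf edges.length (edges.getD 0 []).length (canonP edges edges.length (edges.getD 0 []).length) := by
  unfold color_border_pixels_alt
  simp only []
  set h := edges.length with hh
  set w := (edges.getD 0 []).length with hw
  rw [pass_split]
  simp only []
  set RF := (List.range h).foldl (fun d r => (List.range w).foldl (rfStep edges r) d) PySem.Dict.empty with hRF
  set RL := (List.range h).foldl (fun d r => (List.range w).foldl (rlStep edges r) d) PySem.Dict.empty with hRL
  set CF := (List.range h).foldl (fun d r => (List.range w).foldl (cfStep edges r) d) PySem.Dict.empty with hCF
  set CL := (List.range h).foldl (fun d r => (List.range w).foldl (clStep edges r) d) PySem.Dict.empty with hCL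
  -- lookup characterisations
  have hRFget : ∀ x, RF.get? x = if x ∈ List.range h then scanP (cellE edges x) (List.range w) else none := by
    intro x
    rw [hRF, rfPass_char edges w (List.range h) (List.nodup_range) _ (by simp [PySem.Dict.get?_empty]) x]
    simp [PySem.Dict.get?_empty]
  have hRLget : ∀ x, RL.get? x = if x ∈ List.range h then scanP (cellE edges x) ((List.range w).reverse) else none := by
    intro x
    rw [hRL, rlPass_char edges w (List.range h) (List.nodup_range) _ (by simp [PySem.Dict.get?_empty]) x]
    simp [PySem.Dict.get?_empty]
  have hCFget : ∀ x, CF.get? x = scanP (fun r => decide (x ∈ List.range w) && cellE edges r x) (List.range h) := by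
    intro x
    rw [hCF, cfPass_char edges w (List.range h) _ x]
    simp [PySem.Dict.get?_empty]
  have hCLget : ∀ x, CL.get? x = scanP (fun r => decide (x ∈ List.range w) && cellE edges r x) ((List.range h).reverse) := by
    intro x
    rw [hCL, clPass_char edges w (List.range h) _ x]
    cases scanP (fun r => decide (x ∈ List.range w) && cellE edges r x) ((List.range h).reverse) <;>
      simp [PySem.Dict.get?_empty]
  -- nodup keys
  have hstepPreserve : ∀ (step : PySem.Dict Nat Nat → Nat → PySem.Dict Nat Nat),
      (∀ d c, d.keys.Nodup → (step d c).keys.Nodup) →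
      ∀ (dd : PySem.Dict Nat Nat), dd.keys.Nodup →
      ((List.range h).foldl (fun d r => (List.range w).foldl step d) dd).keys.Nodup := by
    intro step hs dd hdd
    exact nodup_foldl_preserve _ (fun d r hd => nodup_foldl_preserve _ hs (List.range w) d hd) _ _ hdd
  have hRFnd : RF.keys.Nodup := by
    rw [hRF]
    exact nodup_foldl_preserve _
      (fun d r hd => nodup_foldl_preserve _ (step_nodup edges r _ (Or.inl rfl)) _ _ hd)
      _ _ (by simp [PySem.Dict.keys_empty])
  have hRLnd : RL.keys.Nodup := by
    rw [hRL]
    exact nodup_foldl_preserve _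
      (fun d r hd => nodup_foldl_preserve _ (step_nodup edges r _ (Or.inr (Or.inl rfl))) _ _ hd)
      _ _ (by simp [PySem.Dict.keys_empty])
  have hCFnd : CF.keys.Nodup := by
    rw [hCF]
    exact nodup_foldl_preserve _
      (fun d r hd => nodup_foldl_preserve _ (step_nodup edges r _ (Or.inr (Or.inr (Or.inl rfl)))) _ _ hd)
      _ _ (by simp [PySem.Dict.keys_empty])
  have hCLnd : CL.keys.Nodup := by
    rw [hCL]
    exact nodup_foldl_preserve _
      (fun d r hd => nodup_foldl_preserve _ (step_nodup edges r _ (Or.inr (Or.inr (Or.inr rfl)))) _ _ hd)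
      _ _ (by simp [PySem.Dict.keys_empty])
  -- in-range bounds on items
  have hRFrange : ∀ p ∈ RF.items, p.1 < h ∧ p.2 < w := by
    rintro ⟨a, b⟩ hm
    have hg := PySem.Dict.get?_of_mem_items _ hm hRFnd
    rw [hRFget a] at hg
    by_cases ha : a ∈ List.range h
    · rw [if_pos ha] at hg
      obtain ⟨hb, _⟩ := scanP_eq_some hg
      exact ⟨List.mem_range.mp ha, List.mem_range.mp hb⟩
    · rw [if_neg ha] at hg; exact absurd hg (by simp)
  have hRLrange : ∀ p ∈ RL.items, p.1 < h ∧ p.2 < w := by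
    rintro ⟨a, b⟩ hm
    have hg := PySem.Dict.get?_of_mem_items _ hm hRLnd
    rw [hRLget a] at hg
    by_cases ha : a ∈ List.range h
    · rw [if_pos ha] at hg
      obtain ⟨hb, _⟩ := scanP_eq_some hg
      rw [List.mem_reverse] at hb
      exact ⟨List.mem_range.mp ha, List.mem_range.mp hb⟩
    · rw [if_neg ha] at hg; exact absurd hg (by simp)
  have hCFrange : ∀ p ∈ CF.items, p.2 < h ∧ p.1 < w := by
    rintro ⟨a, b⟩ hm
    have hg := PySem.Dict.get?_of_mem_items _ hm hCFnd
    rw [hCFget a] at hg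
    obtain ⟨hb, hp⟩ := scanP_eq_some hg
    simp only [Bool.and_eq_true, decide_eq_true_eq] at hp
    exact ⟨List.mem_range.mp hb, List.mem_range.mp hp.1⟩
  have hCLrange : ∀ p ∈ CL.items, p.2 < h ∧ p.1 < w := by
    rintro ⟨a, b⟩ hm
    have hg := PySem.Dict.get?_of_mem_items _ hm hCLnd
    rw [hCLget a] at hg
    obtain ⟨hb, hp⟩ := scanP_eq_some hg
    simp only [Bool.and_eq_true, decide_eq_true_eq] at hp
    rw [List.mem_reverse] at hb
    exact ⟨List.mem_range.mp hb, List.mem_range.mp hp.1⟩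
  -- the four marking folds
  have hb0 : (List.range h).map (fun _ => (List.range w).map (fun _ => false))
      = gridOf h w (fun _ _ => false) := rfl
  rw [hb0]
  rw [markPairs_gridOf (fun p => p.1) (fun p => p.2) RF.items _ hRFrange,
      markPairs_gridOf (fun p => p.1) (fun p => p.2) RL.items _ hRLrange,
      markPairs_gridOf (fun p => p.2) (fun p => p.1) CF.items _ hCFrange,
      markPairs_gridOf (fun p => p.2) (fun p => p.1) CL.items _ hCLrange]
  apply gridOf_congr
  intro r hr c hc
  have e1 : RF.items.any (fun p => p.1 == r && p.2 == c) = (RF.get? r == some c) := items_any_eq RF hRFnd r c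
  have e2 : RL.items.any (fun p => p.1 == r && p.2 == c) = (RL.get? r == some c) := items_any_eq RL hRLnd r c
  have hswap : (fun p : Nat × Nat => p.2 == r && p.1 == c) = (fun p : Nat × Nat => p.1 == c && p.2 == r) := by
    funext p
    exact Bool.and_comm _ _
  have e3 : CF.items.any (fun p => p.2 == r && p.1 == c) = (CF.get? c == some r) := by
    rw [hswap, items_any_eq CF hCFnd c r]
  have e4 : CL.items.any (fun p => p.2 == r && p.1 == c) = (CL.get? c == some r) := by
    rw [hswap, items_any_eq CL hCLnd c r]
  rw [e1, e2, e3, e4, hRFget r, hRLget r, hCFget c, hCLget c]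
  have hfun : (fun r' => decide (c ∈ List.range w) && cellE edges r' c) = (fun r' => cellE edges r' c) := by
    funext r'
    simp [List.mem_range.mpr hc]
  rw [hfun]
  simp [canonP, List.mem_range.mpr hr, Bool.or_assoc]

-- ===== VERDICT (by name: the statement is the Claim_ definition above) =====
theorem color_border_pixels_spec : Claim_equal_color_border_pixels := by
  intro edges _ _
  unfold Spec_color_border_pixels
  rw [A_eq_canon, B_eq_canon]
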